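-- pv_equiv track=rewrite | github.com/pabby2025/demand-forecast | OneC_4898_DemandForecasting-code-yaswanth/skill_clusters_demand.py | compute_cluster_skill_occurrence
-- ===== SOURCE A (Python) =====
-- from typing import Dict, List, Optional, Set, Tuple
--
-- def compute_cluster_skill_occurrence(
--     row_sets: List[Set[str]],
--     row_to_cluster: List[int],
--     chosen_clusters: List[List[str]],
--     num_clusters: int,
-- ) -> List[Dict[str, int]]:
--     """Per cluster: count of mapped rows containing each skill.
--
--     Occurrence is used downstream to identify mismatch skills (trim_and_replace step): a skill
--     that appears in a cluster but is rarely present in the rows assigned to it is a sign of poor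
--     fit and should be trimmed or replaced.  Counting over the full row skill set (not just cluster
--     skills) means skills that were injected but do not naturally co-occur with the cluster's core
--     skills will have low occurrence and be flagged correctly.
--     """
--     by_cluster: List[Dict[str, int]] = [{} for _ in range(num_clusters)]
--     for i, cidx in enumerate(row_to_cluster):
--         if cidx < 0:
--             # Unassigned rows do not contribute to any cluster's occurrence counts.
--             continue
--         for skill in row_sets[i]:
--             by_cluster[cidx][skill] = by_cluster[cidx].get(skill, 0) + 1
--     return by_cluster
-- ===== SOURCE B (Python) =====
-- from typing import Dict, List, Optional, Set, Tuple
--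
--
-- def compute_cluster_skill_occurrence(
--     row_sets: List[Set[str]],
--     row_to_cluster: List[int],
--     chosen_clusters: List[List[str]],
--     num_clusters: int,
-- ) -> List[Dict[str, int]]:
--     """Partition-then-aggregate: first bucket the assigned row indices per
--     cluster, then in a second pass flatten each bucket's skills and count the
--     flat list with a dict comprehension (same totals and first-occurrence key
--     order as A's in-place increments)."""
--     buckets: List[List[int]] = [[] for _ in range(num_clusters)]
--     for i, cidx in enumerate(row_to_cluster):
--         if cidx >= 0:
--             buckets[cidx].append(i)
--     result: List[Dict[str, int]] = []
--     for bucket in buckets: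
--         flat = [s for i in bucket for s in row_sets[i]]
--         result.append({s: flat.count(s) for s in flat})
--     return result
-- ===== Notes on version B (the rewrite author's own statement) =====
-- stated objective: alternative
-- what changed: A makes one pass over rows, scatter-incrementing dict counts in place per (row, skill); B first partitions the assigned row indices into per-cluster buckets, then in a separate pass flattens each bucket's skills and counts the flat list with a dict comprehension.
-- outside the precondition, e.g. on compute_cluster_skill_occurrence([set()], [5], [], 2): A returns [{}, {}], B raises IndexError
import Mathlib
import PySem

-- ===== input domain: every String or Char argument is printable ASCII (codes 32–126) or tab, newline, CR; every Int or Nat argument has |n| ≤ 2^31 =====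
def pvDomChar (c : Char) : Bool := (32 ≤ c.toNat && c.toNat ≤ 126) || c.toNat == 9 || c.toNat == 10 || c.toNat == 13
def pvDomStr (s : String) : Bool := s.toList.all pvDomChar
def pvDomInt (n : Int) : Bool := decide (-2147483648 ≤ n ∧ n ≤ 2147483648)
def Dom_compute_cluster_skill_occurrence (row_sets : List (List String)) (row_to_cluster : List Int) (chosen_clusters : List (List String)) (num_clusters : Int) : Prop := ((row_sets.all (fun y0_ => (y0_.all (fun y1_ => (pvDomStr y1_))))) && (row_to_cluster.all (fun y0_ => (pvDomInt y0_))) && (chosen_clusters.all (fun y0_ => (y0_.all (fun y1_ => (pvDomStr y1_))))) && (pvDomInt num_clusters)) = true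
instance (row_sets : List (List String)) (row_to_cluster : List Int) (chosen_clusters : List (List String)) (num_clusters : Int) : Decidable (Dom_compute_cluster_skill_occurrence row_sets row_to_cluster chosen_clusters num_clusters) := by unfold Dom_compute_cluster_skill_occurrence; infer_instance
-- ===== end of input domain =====

-- B partitions assigned row indices into per-cluster buckets, then aggregates each bucket's
-- flattened skills in a second pass (partition-then-aggregate vs A's scatter-increment; not claimed faster).

-- ===== PORT A =====
-- A: scatter-increment — one pass over rows, incrementing by_cluster[cidx][skill] in place.
def compute_cluster_skill_occurrence (row_sets : List (List String)) (row_to_cluster : List Int) (chosen_clusters : List (List String)) (num_clusters : Int) : List (List (String × Int)) :=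
  let by_cluster : List (PySem.Dict String Int) :=
    (PySem.List.enumerate row_to_cluster 0).foldl
      (fun bc p =>
        if p.2 < 0 then bc
        else bc.modify p.2.toNat
          (fun d => (row_sets.getD p.1.toNat []).foldl
            (fun d skill => d.insert skill (d.getD skill 0 + 1)) d))
      ((PySem.List.pyRange 0 num_clusters 1).map (fun _ => PySem.Dict.empty))
  by_cluster.map (·.items)

-- ===== PORT B =====
-- B stage 1: the bucket-filling loop 'for i, cidx in enumerate(...): if cidx >= 0: buckets[cidx].append(i)'
def pvFill (buckets : List (List Int)) : List (Int × Int) → List (List Int)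
  | [] => buckets
  | p :: rest =>
      pvFill (if 0 ≤ p.2 then buckets.modify p.2.toNat (fun b => b ++ [p.1]) else buckets) rest

-- B stage 2: the result loop — flatten one bucket's skills, count the flat list, move on
def pvAgg (row_sets : List (List String)) : List (List Int) → List (List (String × Int))
  | [] => []
  | bucket :: rest =>
      let flat : List String := bucket.flatMap (fun i => row_sets.getD i.toNat [])
      (flat.foldl (fun d s => d.insert s ((PySem.List.count flat s : Int)))
        PySem.Dict.empty).items :: pvAgg row_sets rest

-- B: partition assigned row indices into per-cluster buckets, then aggregate each bucket.
def compute_cluster_skill_occurrence_alt (row_sets : List (List String)) (row_to_cluster : List Int) (chosen_clusters : List (List String)) (num_clusters : Int) : List (List (String × Int)) :=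
  pvAgg row_sets
    (pvFill ((PySem.List.pyRange 0 num_clusters 1).map (fun _ => ([] : List Int)))
      (PySem.List.enumerate row_to_cluster 0))

-- ===== PRECONDITION & SPEC =====
-- Pre_ excludes inputs where some assigned row (cidx >= 0) has its index outside row_sets
-- or cidx >= num_clusters: there A raises IndexError, except that when such a row's skill
-- set is empty A's inner loop never indexes and A returns, while B's bucket indexing raises.
def Pre_compute_cluster_skill_occurrence (row_sets : List (List String)) (row_to_cluster : List Int) (chosen_clusters : List (List String)) (num_clusters : Int) : Prop :=
  ∀ p ∈ PySem.List.enumerate row_to_cluster 0,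
    0 ≤ p.2 → (p.1 < (row_sets.length : Int) ∧ p.2 < num_clusters)
instance (row_sets : List (List String)) (row_to_cluster : List Int) (chosen_clusters : List (List String)) (num_clusters : Int) : Decidable (Pre_compute_cluster_skill_occurrence row_sets row_to_cluster chosen_clusters num_clusters) := by unfold Pre_compute_cluster_skill_occurrence; infer_instance

def pvWitness_compute_cluster_skill_occurrence : List (List String) × List Int × List (List String) × Int :=
  ([["a", "b"], ["b"], ["c"]], [0, 1, 0], [["a"], ["b"]], 2)

def Spec_compute_cluster_skill_occurrence (row_sets : List (List String)) (row_to_cluster : List Int) (chosen_clusters : List (List String)) (num_clusters : Int) (out : List (List (String × Int))) : Prop := out = compute_cluster_skill_occurrence_alt row_sets row_to_cluster chosen_clusters num_clusters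
instance (row_sets : List (List String)) (row_to_cluster : List Int) (chosen_clusters : List (List String)) (num_clusters : Int) (out : List (List (String × Int))) : Decidable (Spec_compute_cluster_skill_occurrence row_sets row_to_cluster chosen_clusters num_clusters out) := by unfold Spec_compute_cluster_skill_occurrence; infer_instance

-- ===== CLAIM (what is proved, stated in full; the proofs are below) =====
def Claim_equal_compute_cluster_skill_occurrence : Prop := ∀ (row_sets : List (List String)) (row_to_cluster : List Int) (chosen_clusters : List (List String)) (num_clusters : Int), Dom_compute_cluster_skill_occurrence row_sets row_to_cluster chosen_clusters num_clusters → Pre_compute_cluster_skill_occurrence row_sets row_to_cluster chosen_clusters num_clusters → Spec_compute_cluster_skill_occurrence row_sets row_to_cluster chosen_clusters num_clusters (compute_cluster_skill_occurrence row_sets row_to_cluster chosen_clusters num_clusters)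

-- ===== LEMMAS AND PROOFS =====

-- modify commutes with map when the two step functions commute with f
theorem pv_map_modify_comm {α β : Type} (f : α → β) (g : β → β) (h : α → α)
    (hc : ∀ a, g (f a) = f (h a)) :
    ∀ (l : List α) (n : Nat), (l.map f).modify n g = (l.modify n h).map f := by
  intro l
  induction l with
  | nil => intro n; simp
  | cons x xs ih =>
    intro n
    cases n with
    | zero => simp [List.modify_cons, hc]
    | succ m => simp [ih m]

-- a fold inserting (s, v s) over l builds the first-occurrence dedup keyed map
theorem pv_foldl_insert_const (v : String → Int) :
    ∀ (l S : List String), S.Nodup →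
      l.foldl (fun d s => d.insert s (v s))
        (PySem.Dict.mk (S.map (fun k => (k, v k))))
      = PySem.Dict.mk ((PySem.Set.update S l).map (fun k => (k, v k))) := by
  intro l
  induction l with
  | nil => intro S _; simp [PySem.Set.update]
  | cons x xs ih =>
    intro S hS
    have hkeys : (PySem.Dict.mk (S.map (fun k => (k, v k)))).keys = S := by
      rw [PySem.Dict.keys_mk, List.map_map]
      simp [Function.comp_def]
    have hcont : (PySem.Dict.mk (S.map (fun k => (k, v k)))).contains x = decide (x ∈ S) := by
      rw [PySem.Dict.contains_eq_decide_mem_keys, hkeys]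
    by_cases hx : x ∈ S
    · have hc : (PySem.Dict.mk (S.map (fun k => (k, v k)))).contains x = true := by
        rw [hcont]; simp [hx]
      have hins : (PySem.Dict.mk (S.map (fun k => (k, v k)))).insert x (v x)
          = PySem.Dict.mk (S.map (fun k => (k, v k))) := by
        apply PySem.Dict.ext
        rw [PySem.Dict.items_insert_of_contains _ _ hc]
        show (S.map (fun k => (k, v k))).map _ = S.map (fun k => (k, v k))
        rw [List.map_map]
        apply List.map_congr_left
        intro k _
        by_cases hkx : k = x <;> simp [hkx]
      have hupd : PySem.Set.add S x = S := by simp [PySem.Set.add, hx]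
      calc (x :: xs).foldl (fun d s => d.insert s (v s))
              (PySem.Dict.mk (S.map (fun k => (k, v k))))
          = xs.foldl (fun d s => d.insert s (v s))
              (PySem.Dict.mk (S.map (fun k => (k, v k)))) := by
            rw [List.foldl_cons, hins]
        _ = PySem.Dict.mk ((PySem.Set.update S xs).map (fun k => (k, v k))) := ih S hS
        _ = PySem.Dict.mk ((PySem.Set.update S (x :: xs)).map (fun k => (k, v k))) := by
            rw [PySem.Set.update_cons, hupd]
    · have hc : (PySem.Dict.mk (S.map (fun k => (k, v k)))).contains x = false := by
        rw [hcont]; simp [hx]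
      have hins : (PySem.Dict.mk (S.map (fun k => (k, v k)))).insert x (v x)
          = PySem.Dict.mk ((S ++ [x]).map (fun k => (k, v k))) := by
        apply PySem.Dict.ext
        rw [PySem.Dict.items_insert_of_not_contains _ _ hc]
        show S.map (fun k => (k, v k)) ++ [(x, v x)] = (S ++ [x]).map (fun k => (k, v k))
        simp
      have hupd : PySem.Set.add S x = S ++ [x] := by simp [PySem.Set.add, hx]
      have hnd : (S ++ [x]).Nodup := by
        rw [List.nodup_append]
        refine ⟨hS, List.nodup_singleton x, ?_⟩
        intro a ha b hb
        simp only [List.mem_singleton] at hb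
        subst hb
        exact fun he => hx (by rw [← he]; exact ha)
      calc (x :: xs).foldl (fun d s => d.insert s (v s))
              (PySem.Dict.mk (S.map (fun k => (k, v k))))
          = xs.foldl (fun d s => d.insert s (v s))
              (PySem.Dict.mk ((S ++ [x]).map (fun k => (k, v k)))) := by
            rw [List.foldl_cons, hins]
        _ = PySem.Dict.mk ((PySem.Set.update (S ++ [x]) xs).map (fun k => (k, v k))) := ih _ hnd
        _ = PySem.Dict.mk ((PySem.Set.update S (x :: xs)).map (fun k => (k, v k))) := by
            rw [PySem.Set.update_cons, hupd]

-- B's per-bucket dict comprehension equals Counter(flat)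
theorem pv_bucket_dict_eq_counter (flat : List String) :
    flat.foldl (fun d s => d.insert s ((PySem.List.count flat s : Int))) PySem.Dict.empty
      = PySem.Dict.counter flat := by
  apply PySem.Dict.ext
  have h := pv_foldl_insert_const (fun s => (PySem.List.count flat s : Int)) flat [] (by simp)
  simp only [List.map_nil] at h
  rw [show (PySem.Dict.empty : PySem.Dict String Int) = PySem.Dict.mk ([] : List (String × Int)) from rfl, h]
  rw [PySem.Dict.items_counter]
  show (PySem.Set.update [] flat).map _ = _
  rw [PySem.Set.update_nil_left]
  simp [PySem.List.count]

-- incremental counting over a bucket, as a function of the bucket's flat list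
def pvInc (flat : List String) : PySem.Dict String Int :=
  flat.foldl (fun d skill => d.insert skill (d.getD skill 0 + 1)) PySem.Dict.empty

-- A's dict-list fold is the image under pvInc of a bucket-of-skills fold
theorem pv_loop_comm (ps : List (Int × Int)) (row_sets : List (List String)) :
    ∀ (bs : List (List String)),
      ps.foldl
        (fun bc p =>
          if p.2 < 0 then bc
          else bc.modify p.2.toNat
            (fun d => (row_sets.getD p.1.toNat []).foldl
              (fun d skill => d.insert skill (d.getD skill 0 + 1)) d))
        (bs.map pvInc)
      = (ps.foldl
          (fun bs p =>
            if 0 ≤ p.2 then bs.modify p.2.toNat (fun b => b ++ row_sets.getD p.1.toNat [])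
            else bs) bs).map pvInc := by
  induction ps with
  | nil => intro bs; simp
  | cons p ps ih =>
    intro bs
    by_cases hneg : p.2 < 0
    · simp only [List.foldl_cons, if_pos hneg, if_neg (by omega : ¬ 0 ≤ p.2)]
      exact ih bs
    · simp only [List.foldl_cons, if_neg hneg, if_pos (by omega : 0 ≤ p.2)]
      rw [pv_map_modify_comm pvInc
        (fun d => (row_sets.getD p.1.toNat []).foldl
          (fun d skill => d.insert skill (d.getD skill 0 + 1)) d)
        (fun b => b ++ row_sets.getD p.1.toNat [])
        (fun b => by simp [pvInc, List.foldl_append])]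
      exact ih _

-- the bucket fold preserves length
theorem pv_bucket_len {α : Type} (f : Int × Int → List α) :
    ∀ (ps : List (Int × Int)) (bs : List (List α)),
      (ps.foldl (fun bs p => if 0 ≤ p.2 then bs.modify p.2.toNat (fun b => b ++ f p) else bs)
        bs).length = bs.length := by
  intro ps
  induction ps with
  | nil => intro bs; rfl
  | cons p ps ih =>
    intro bs
    by_cases h : 0 ≤ p.2 <;> simp [h, ih]

-- each bucket of the scatter fold is the gathered flat list of its cluster
theorem pv_bucket_getElem {α : Type} (f : Int × Int → List α) :
    ∀ (ps : List (Int × Int)) (bs : List (List α)) (j : Nat) (hj : j < bs.length),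
      (ps.foldl (fun bs p => if 0 ≤ p.2 then bs.modify p.2.toNat (fun b => b ++ f p) else bs)
          bs)[j]'(by rw [pv_bucket_len]; exact hj)
      = bs[j] ++ ps.flatMap (fun p => if p.2 == (j : Int) then f p else []) := by
  intro ps
  induction ps with
  | nil => intro bs j hj; simp
  | cons p ps ih =>
    intro bs j hj
    by_cases hge : 0 ≤ p.2
    · have hlen : (bs.modify p.2.toNat (fun b => b ++ f p)).length = bs.length :=
        List.length_modify ..
      simp only [List.foldl_cons, if_pos hge, List.flatMap_cons]
      rw [ih (bs.modify p.2.toNat (fun b => b ++ f p)) j (by rw [hlen]; exact hj)]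
      by_cases heq : p.2 = (j : Int)
      · have : p.2.toNat = j := by omega
        rw [List.getElem_modify]
        simp [heq, List.append_assoc]
      · have hne : p.2.toNat ≠ j := by omega
        rw [List.getElem_modify]
        simp [hne, (by simpa using heq : ¬ p.2 = (j : Int))]
    · simp only [List.foldl_cons, if_neg hge, List.flatMap_cons]
      rw [ih bs j hj]
      have : ¬ p.2 = (j : Int) := by omega
      simp [this]

-- pvFill is the corresponding left fold
theorem pv_fill_eq_foldl :
    ∀ (ps : List (Int × Int)) (bs : List (List Int)),
      pvFill bs ps
      = ps.foldl (fun bs p =>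
          if 0 ≤ p.2 then bs.modify p.2.toNat (fun b => b ++ [p.1]) else bs) bs := by
  intro ps
  induction ps with
  | nil => intro bs; rfl
  | cons p rest ih => intro bs; simp [pvFill, ih]

-- pvAgg is the corresponding map
theorem pv_agg_eq_map (row_sets : List (List String)) :
    ∀ (bs : List (List Int)),
      pvAgg row_sets bs
      = bs.map (fun bucket =>
          ((bucket.flatMap (fun i => row_sets.getD i.toNat [])).foldl
            (fun d s => d.insert s
              ((PySem.List.count (bucket.flatMap (fun i => row_sets.getD i.toNat [])) s : Int)))
            PySem.Dict.empty).items) := by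
  intro bs
  induction bs with
  | nil => rfl
  | cons b rest ih => simp [pvAgg, ih]

-- ===== VERDICT (by name: the statement is the Claim_ definition above) =====
theorem compute_cluster_skill_occurrence_spec : Claim_equal_compute_cluster_skill_occurrence := by
  intro row_sets row_to_cluster chosen_clusters num_clusters _ _
  unfold Spec_compute_cluster_skill_occurrence
  unfold compute_cluster_skill_occurrence compute_cluster_skill_occurrence_alt
  rw [pv_fill_eq_foldl, pv_agg_eq_map]
  have hinit : ((PySem.List.pyRange 0 num_clusters 1).map (fun _ => (PySem.Dict.empty : PySem.Dict String Int)))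
      = ((PySem.List.pyRange 0 num_clusters 1).map (fun _ => ([] : List String))).map pvInc := by
    rw [List.map_map]; rfl
  rw [hinit, pv_loop_comm]
  rw [List.map_map]
  apply List.ext_getElem
  · simp [pv_bucket_len]
  · intro j h1 h2
    have hjr : j < (PySem.List.pyRange 0 num_clusters 1).length := by
      simpa [pv_bucket_len] using h1
    rw [List.getElem_map, List.getElem_map]
    rw [pv_bucket_getElem (fun p => row_sets.getD p.1.toNat [])
      (PySem.List.enumerate row_to_cluster 0)
      ((PySem.List.pyRange 0 num_clusters 1).map (fun _ => ([] : List String))) j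
      (by simpa using hjr)]
    rw [pv_bucket_getElem (fun p => [p.1])
      (PySem.List.enumerate row_to_cluster 0)
      ((PySem.List.pyRange 0 num_clusters 1).map (fun _ => ([] : List Int))) j
      (by simpa using hjr)]
    have hflat :
        ((PySem.List.enumerate row_to_cluster 0).flatMap
            (fun p => if p.2 == (j : Int) then [p.1] else [])).flatMap
          (fun i => row_sets.getD i.toNat [])
        = (PySem.List.enumerate row_to_cluster 0).flatMap
            (fun p => if p.2 == (j : Int) then row_sets.getD p.1.toNat [] else []) := by
      rw [List.flatMap_assoc]
      apply List.flatMap_congr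
      intro p _
      by_cases h : p.2 == (j : Int) <;> simp [h]
    simp only [List.getElem_map, List.nil_append]
    rw [hflat]
    simp only [Function.comp]
    rw [show pvInc ((PySem.List.enumerate row_to_cluster 0).flatMap
          (fun p => if p.2 == (j : Int) then row_sets.getD p.1.toNat [] else []))
        = PySem.Dict.counter _ from PySem.Dict.foldl_insert_getD_add_one_eq_counter _]
    rw [← pv_bucket_dict_eq_counter]
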